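-- pv_equiv track=rewrite | github.com/yuuforest/Personal-Project | PCCP 모의고사/실습용 로봇.py | solution
-- ===== SOURCE A (Python) =====
-- def solution(command):
--     answer = [0, 0]
--
--     dir = 0     # 위 0 오른쪽 1 아래 2 왼쪽 3
--
--     for c in command:
--
--         if c == 'R':
--             dir = moveR(dir)
--         elif c == 'L':
--             dir = moveL(dir)
--         elif c == 'G':
--             answer[0], answer[1] = moveG(answer[0], answer[1], dir)
--         else:
--             answer[0], answer[1] = moveB(answer[0], answer[1], dir)
--
--     return answer
--
-- def moveR(dir):
--     return (dir + 1) % 4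
--
-- def moveL(dir):
--     return 3 if dir-1 < 0 else dir-1
--
-- def moveG(x, y, dir):
--     if dir == 0:
--         return x, y+1
--     elif dir == 1:
--         return x+1, y
--     elif dir == 2:
--         return x, y-1
--     else:
--         return x-1, y
--
-- def moveB(x, y, dir):
--     if dir == 0:
--         return x, y-1
--     elif dir == 1:
--         return x-1, y
--     elif dir == 2:
--         return x, y+1
--     else:
--         return x+1, y
-- ===== SOURCE B (Python) =====
-- def solution(command):
--     # Backward scan: (x, y) is the displacement produced by the suffix already
--     # processed, expressed in the frame the robot is in when that suffix starts.
--     # A turn rotates that whole accumulated displacement; no facing is tracked.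
--     x = y = 0
--     for c in reversed(command):
--         if c == 'R':
--             x, y = y, -x
--         elif c == 'L':
--             x, y = -y, x
--         elif c == 'G':
--             y += 1
--         else:
--             y -= 1
--     return [x, y]
-- ===== Notes on version B (the rewrite author's own statement) =====
-- stated objective: alternative
-- what changed: B tracks no facing/direction state at all: it scans the command backwards, maintaining only the displacement of the processed suffix, and each turn rotates that accumulated vector (R: (x,y)->(y,-x), L: (x,y)->(-y,x)) while G/B just add/subtract 1 to y; constant-factor speedup from eliminating A's per-step helper-function calls and direction branching.
import Mathlib
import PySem

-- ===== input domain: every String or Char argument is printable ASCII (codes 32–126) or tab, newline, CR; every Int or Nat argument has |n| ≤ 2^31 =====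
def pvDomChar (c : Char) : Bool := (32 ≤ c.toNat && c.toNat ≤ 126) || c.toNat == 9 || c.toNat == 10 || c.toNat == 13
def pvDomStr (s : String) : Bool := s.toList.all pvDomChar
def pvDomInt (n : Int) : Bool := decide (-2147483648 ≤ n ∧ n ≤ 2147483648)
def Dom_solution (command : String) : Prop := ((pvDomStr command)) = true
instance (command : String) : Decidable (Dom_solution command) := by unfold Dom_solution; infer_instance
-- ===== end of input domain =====

-- B drops A's direction-state simulation entirely: it scans the command backwards and
-- rotates the accumulated suffix displacement on each turn (same O(n) cost, alternative algorithm).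

-- ===== PORT A =====
def moveR (dir : Int) : Int := PySem.Int.mod (dir + 1) 4

def moveL (dir : Int) : Int := if dir - 1 < 0 then 3 else dir - 1

def moveG (x y dir : Int) : Int × Int :=
  if dir = 0 then (x, y + 1)
  else if dir = 1 then (x + 1, y)
  else if dir = 2 then (x, y - 1)
  else (x - 1, y)

def moveB (x y dir : Int) : Int × Int :=
  if dir = 0 then (x, y - 1)
  else if dir = 1 then (x - 1, y)
  else if dir = 2 then (x, y + 1)
  else (x + 1, y)

def solStepA (st : (Int × Int) × Int) (c : Char) : (Int × Int) × Int :=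
  if c = 'R' then (st.1, moveR st.2)
  else if c = 'L' then (st.1, moveL st.2)
  else if c = 'G' then (moveG st.1.1 st.1.2 st.2, st.2)
  else (moveB st.1.1 st.1.2 st.2, st.2)

def solution (command : String) : List Int :=
  let st := command.toList.foldl solStepA ((0, 0), 0)
  [st.1.1, st.1.2]

-- ===== PORT B =====
def solStepB (st : Int × Int) (c : Char) : Int × Int :=
  if c = 'R' then (st.2, -st.1)
  else if c = 'L' then (-st.2, st.1)
  else if c = 'G' then (st.1, st.2 + 1)
  else (st.1, st.2 - 1)

def solution_alt (command : String) : List Int :=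
  let st := command.toList.reverse.foldl solStepB (0, 0)
  [st.1, st.2]

-- ===== PRECONDITION & SPEC =====
def Spec_solution (command : String) (out : List Int) : Prop := out = solution_alt command
instance (command : String) (out : List Int) : Decidable (Spec_solution command out) := by unfold Spec_solution; infer_instance

-- ===== CLAIM =====
def Claim_equal_solution : Prop := ∀ (command : String), Dom_solution command → Spec_solution command (solution command)

-- ===== LEMMAS AND PROOFS =====

/-- Rotate a vector clockwise by `d` quarter turns (d ∈ {0,1,2,3}). -/
def rotD (d : Int) (v : Int × Int) : Int × Int :=
  if d = 0 then v
  else if d = 1 then (v.2, -v.1)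
  else if d = 2 then (-v.1, -v.2)
  else (-v.2, v.1)

/-- B's backward fold written as a foldr. -/
def foldB (l : List Char) : Int × Int :=
  l.foldr (fun c acc => solStepB acc c) (0, 0)

theorem foldB_eq (l : List Char) :
    l.reverse.foldl solStepB (0, 0) = foldB l := by
  simp [foldB, List.foldl_reverse]

/-- One-step compatibility between A's state transition and B's rotation step. -/
theorem step_compat (c : Char) (p : Int × Int) (d : Int) (w : Int × Int)
    (hd0 : 0 ≤ d) (hd4 : d < 4) :
    (solStepA (p, d) c).1.1 + (rotD (solStepA (p, d) c).2 w).1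
      = p.1 + (rotD d (solStepB w c)).1
    ∧ (solStepA (p, d) c).1.2 + (rotD (solStepA (p, d) c).2 w).2
      = p.2 + (rotD d (solStepB w c)).2
    ∧ 0 ≤ (solStepA (p, d) c).2 ∧ (solStepA (p, d) c).2 < 4 := by
  have hd : d = 0 ∨ d = 1 ∨ d = 2 ∨ d = 3 := by omega
  rcases hd with hd | hd | hd | hd <;> subst hd <;>
    by_cases hR : c = 'R' <;> by_cases hL : c = 'L' <;> by_cases hG : c = 'G' <;>
    simp [solStepA, solStepB, rotD, moveR, moveL, moveG, moveB, hR, hL, hG,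
      PySem.Int.mod] <;> omega

/-- Main invariant: A's fold from any position/direction equals position plus the
rotated suffix displacement computed by B. -/
theorem fold_compat (l : List Char) (p : Int × Int) (d : Int)
    (hd0 : 0 ≤ d) (hd4 : d < 4) :
    (l.foldl solStepA (p, d)).1.1 = p.1 + (rotD d (foldB l)).1
    ∧ (l.foldl solStepA (p, d)).1.2 = p.2 + (rotD d (foldB l)).2 := by
  induction l generalizing p d with
  | nil => simp [foldB, rotD]
  | cons c l ih =>
    obtain ⟨h1, h2, h3, h4⟩ := step_compat c p d (foldB l) hd0 hd4
    have hA : solStepA (p, d) c = ((solStepA (p, d) c).1, (solStepA (p, d) c).2) := rfl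
    have := ih (solStepA (p, d) c).1 (solStepA (p, d) c).2 h3 h4
    constructor
    · calc (List.foldl solStepA (p, d) (c :: l)).1.1
          = (List.foldl solStepA (solStepA (p, d) c) l).1.1 := by simp
        _ = (solStepA (p, d) c).1.1 + (rotD (solStepA (p, d) c).2 (foldB l)).1 := by
            rw [hA] at this ⊢; exact this.1
        _ = p.1 + (rotD d (solStepB (foldB l) c)).1 := h1
        _ = p.1 + (rotD d (foldB (c :: l))).1 := by simp [foldB]
    · calc (List.foldl solStepA (p, d) (c :: l)).1.2
          = (List.foldl solStepA (solStepA (p, d) c) l).1.2 := by simp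
        _ = (solStepA (p, d) c).1.2 + (rotD (solStepA (p, d) c).2 (foldB l)).2 := by
            rw [hA] at this ⊢; exact this.2
        _ = p.2 + (rotD d (solStepB (foldB l) c)).2 := h2
        _ = p.2 + (rotD d (foldB (c :: l))).2 := by simp [foldB]

-- ===== VERDICT =====
theorem solution_spec : Claim_equal_solution := by
  intro command _
  unfold Spec_solution solution solution_alt
  obtain ⟨h1, h2⟩ := fold_compat command.toList (0, 0) 0 (by norm_num) (by norm_num)
  rw [foldB_eq]
  simp [h1, h2, rotD]
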